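-- pv_equiv track=rewrite | github.com/navid-rida/remmittance-app | rem/templatetags/number_filters.py | comma_seperated_bangla
-- ===== SOURCE A (Python) =====
-- def comma_seperated_bangla(value):
--     s = str(value) if value else '0.00'
--     dec_right = s.split('.')[1] if len(s.split('.'))>1 else '' #Number after decimal point
--     dec_left = s.split('.')[0] #Number of the left side of decimal
--     if len(dec_left)<=3:
--         return s
--     left_s = dec_left[0:len(dec_left)-3]
--     right_s = dec_left[-3:]
--     s2 = [left_s[-2-i:len(left_s)-i] for i in range(0, len(left_s),2)]
--     s2.reverse()
--     if len(dec_right)>=1: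
--         s_final = ','.join(s2)+','+right_s+'.'+dec_right
--     else:
--         s_final = ','.join(s2)+','+right_s
--     return s_final
-- ===== SOURCE B (Python) =====
-- def comma_seperated_bangla(value):
--     s = str(value) if value else '0.00'
--     parts = s.split('.')
--     dec_left = parts[0]
--     dec_right = parts[1] if len(parts) > 1 else ''
--     n = len(dec_left)
--     if n <= 3:
--         return s
--     # single forward pass: a comma goes before a character exactly when the
--     # number of characters remaining from it (r) is 3, or is >3 and odd
--     out = []
--     r = n
--     for ch in dec_left:
--         if r < n and (r == 3 or (r > 3 and r % 2 == 1)):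
--             out.append(',')
--         out.append(ch)
--         r -= 1
--     res = ''.join(out)
--     if dec_right:
--         res = res + '.' + dec_right
--     return res
-- ===== Notes on version B (the rewrite author's own statement) =====
-- stated objective: alternative
-- what changed: Replaces A's build-groups-by-slicing (a range-step-2 slice comprehension, list reverse, ','.join plus a separately concatenated 3-char tail group) with a single forward pass over the raw left part that emits a comma before a character exactly when the number of characters remaining from it is 3, or greater than 3 and odd.
import Mathlib
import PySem

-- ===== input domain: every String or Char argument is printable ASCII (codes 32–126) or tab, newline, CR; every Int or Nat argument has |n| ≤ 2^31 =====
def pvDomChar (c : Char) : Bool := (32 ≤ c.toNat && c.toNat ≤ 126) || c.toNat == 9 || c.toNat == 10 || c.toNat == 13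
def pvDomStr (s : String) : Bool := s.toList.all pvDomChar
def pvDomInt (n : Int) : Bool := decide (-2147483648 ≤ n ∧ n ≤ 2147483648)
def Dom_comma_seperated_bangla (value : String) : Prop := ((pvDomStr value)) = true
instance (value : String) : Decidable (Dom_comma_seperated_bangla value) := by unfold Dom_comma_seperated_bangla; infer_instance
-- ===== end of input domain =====

-- B replaces A's slice-comprehension grouping + reverse + join by a single forward pass that
-- decides per character, from the count of characters remaining, whether a comma precedes it
-- (same cost, different algorithmic decomposition).

-- ===== PORT A =====
def comma_seperated_bangla (value : String) : String :=
  let s : List Char := if value.toList ≠ [] then value.toList else "0.00".toList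
  let parts := PySem.Chars.splitOn s ['.']
  let dec_right := if parts.length > 1 then parts.getD 1 [] else []
  let dec_left := parts.getD 0 []
  if dec_left.length ≤ 3 then String.ofList s
  else
    let left_s := PySem.List.slice dec_left (some 0) (some ((dec_left.length : Int) - 3))
    let right_s := PySem.List.slice dec_left (some (-3)) none
    let s2 := (PySem.List.pyRange 0 (left_s.length : Int) 2).map
      (fun i => PySem.List.slice left_s (some (-2 - i)) (some ((left_s.length : Int) - i)))
    let s2 := s2.reverse
    if dec_right.length ≥ 1 then
      String.ofList (PySem.Chars.join [','] s2 ++ [','] ++ right_s ++ ['.'] ++ dec_right)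
    else
      String.ofList (PySem.Chars.join [','] s2 ++ [','] ++ right_s)

-- ===== PORT B =====
-- the body of Source B's 'for ch in dec_left' loop: state = (out, r)
def pvBStep (n : Nat) (p : List Char × Nat) (ch : Char) : List Char × Nat :=
  let out := if p.2 < n ∧ (p.2 = 3 ∨ (3 < p.2 ∧ p.2 % 2 = 1)) then p.1 ++ [','] else p.1
  (out ++ [ch], p.2 - 1)

def comma_seperated_bangla_alt (value : String) : String :=
  let s : List Char := if value.toList ≠ [] then value.toList else "0.00".toList
  let parts := PySem.Chars.splitOn s ['.']
  let dec_left := parts.getD 0 []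
  let dec_right := if parts.length > 1 then parts.getD 1 [] else []
  let n := dec_left.length
  if n ≤ 3 then String.ofList s
  else
    let res := (dec_left.foldl (pvBStep n) ([], n)).1
    if dec_right ≠ [] then String.ofList (res ++ ['.'] ++ dec_right)
    else String.ofList res

-- ===== PRECONDITION & SPEC =====
def Spec_comma_seperated_bangla (value : String) (out : String) : Prop := out = comma_seperated_bangla_alt value
instance (value : String) (out : String) : Decidable (Spec_comma_seperated_bangla value out) := by unfold Spec_comma_seperated_bangla; infer_instance

-- ===== CLAIM (what is proved, stated in full; the proofs are below) =====
def Claim_equal_comma_seperated_bangla : Prop := ∀ (value : String), Dom_comma_seperated_bangla value → Spec_comma_seperated_bangla value (comma_seperated_bangla value)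

-- ===== LEMMAS AND PROOFS =====

-- recursive description of B's loop
def pvEmit (n : Nat) : List Char → Nat → List Char
  | [], _ => []
  | c :: cs, r =>
      (if r < n ∧ (r = 3 ∨ (3 < r ∧ r % 2 = 1)) then [','] else []) ++ c :: pvEmit n cs (r - 1)

theorem pv_fold_emit (n : Nat) (dl : List Char) : ∀ (acc : List Char) (r : Nat),
    (dl.foldl (pvBStep n) (acc, r)).1 = acc ++ pvEmit n dl r := by
  induction dl with
  | nil => intro acc r; simp [pvEmit]
  | cons c cs ih =>
    intro acc r
    simp only [List.foldl_cons, pvBStep, pvEmit]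
    split_ifs with h <;> rw [ih] <;> simp

-- the comma predicate only looks at r once r < n; n can be lowered
theorem pv_emit_shift (cs : List Char) : ∀ (n n' r : Nat), r < n → r < n' →
    pvEmit n cs r = pvEmit n' cs r := by
  induction cs with
  | nil => intro n n' r _ _; rfl
  | cons c cs ih =>
    intro n n' r h h'
    simp only [pvEmit]
    by_cases hp : r = 3 ∨ (3 < r ∧ r % 2 = 1)
    · rw [if_pos ⟨h, hp⟩, if_pos ⟨h', hp⟩, ih n n' (r-1) (by omega) (by omega)]
    · rw [if_neg (by tauto), if_neg (by tauto), ih n n' (r-1) (by omega) (by omega)]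

theorem pv_emit_le_two (cs : List Char) : ∀ (n r : Nat), r ≤ 2 → pvEmit n cs r = cs := by
  induction cs with
  | nil => intro n r _; rfl
  | cons c cs ih =>
    intro n r h
    simp only [pvEmit]
    rw [if_neg (by omega), ih n (r-1) (by omega)]
    rfl

theorem pv_emit_three (cs : List Char) : pvEmit 3 cs 3 = cs := by
  cases cs with
  | nil => rfl
  | cons c cs => simp only [pvEmit]; rw [if_neg (by omega), pv_emit_le_two cs 3 2 (by omega)]; rfl

-- peel the leading group of size g off B's emission
theorem pvEmit_cons (n r : Nat) (c : Char) (cs : List Char) :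
    pvEmit n (c :: cs) r
      = (if r < n ∧ (r = 3 ∨ (3 < r ∧ r % 2 = 1)) then [','] else []) ++ c :: pvEmit n cs (r - 1) := rfl

-- peel the leading group of size g off B's emission
theorem pv_emit_peel (dl : List Char) (h : 3 < dl.length) :
    pvEmit dl.length dl dl.length
      = dl.take (if (dl.length - 3) % 2 = 1 then 1 else 2) ++ [','] ++
        pvEmit (dl.length - (if (dl.length - 3) % 2 = 1 then 1 else 2))
          (dl.drop (if (dl.length - 3) % 2 = 1 then 1 else 2))
          (dl.length - (if (dl.length - 3) % 2 = 1 then 1 else 2)) := by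
  by_cases hg : (dl.length - 3) % 2 = 1
  · rw [if_pos hg]
    match dl, h, hg with
    | c :: c2 :: cs, hlen, hg =>
      simp only [List.length_cons] at hlen hg ⊢
      rw [show cs.length + 1 + 1 - 1 = cs.length + 1 from by omega]
      show pvEmit (cs.length + 1 + 1) (c :: c2 :: cs) (cs.length + 1 + 1)
        = [c] ++ [','] ++ pvEmit (cs.length + 1) (c2 :: cs) (cs.length + 1)
      rw [pvEmit_cons]
      rw [show cs.length + 1 + 1 - 1 = cs.length + 1 from by omega]
      rw [if_neg (show ¬(cs.length + 1 + 1 < cs.length + 1 + 1 ∧ (cs.length + 1 + 1 = 3 ∨ (3 < cs.length + 1 + 1 ∧ (cs.length + 1 + 1) % 2 = 1))) from by omega)]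
      rw [pvEmit_cons]
      rw [show cs.length + 1 - 1 = cs.length from by omega]
      rw [if_pos (show cs.length + 1 < cs.length + 1 + 1 ∧ (cs.length + 1 = 3 ∨ (3 < cs.length + 1 ∧ (cs.length + 1) % 2 = 1)) from by omega)]
      rw [pvEmit_cons]
      rw [show cs.length + 1 - 1 = cs.length from by omega]
      rw [if_neg (show ¬(cs.length + 1 < cs.length + 1 ∧ (cs.length + 1 = 3 ∨ (3 < cs.length + 1 ∧ (cs.length + 1) % 2 = 1))) from by omega)]
      rw [pv_emit_shift cs (cs.length + 1 + 1) (cs.length + 1) cs.length (by omega) (by omega)]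
      simp
  · rw [if_neg hg]
    have hg' : (dl.length - 3) % 2 = 0 := by omega
    match dl, h, hg' with
    | c :: c2 :: c3 :: cs, hlen, hg' =>
      simp only [List.length_cons] at hlen hg' ⊢
      rw [show cs.length + 1 + 1 + 1 - 2 = cs.length + 1 from by omega]
      show pvEmit (cs.length + 1 + 1 + 1) (c :: c2 :: c3 :: cs) (cs.length + 1 + 1 + 1)
        = [c, c2] ++ [','] ++ pvEmit (cs.length + 1) (c3 :: cs) (cs.length + 1)
      rw [pvEmit_cons]
      rw [show cs.length + 1 + 1 + 1 - 1 = cs.length + 1 + 1 from by omega]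
      rw [if_neg (show ¬(cs.length + 1 + 1 + 1 < cs.length + 1 + 1 + 1 ∧ (cs.length + 1 + 1 + 1 = 3 ∨ (3 < cs.length + 1 + 1 + 1 ∧ (cs.length + 1 + 1 + 1) % 2 = 1))) from by omega)]
      rw [pvEmit_cons]
      rw [show cs.length + 1 + 1 - 1 = cs.length + 1 from by omega]
      rw [if_neg (show ¬(cs.length + 1 + 1 < cs.length + 1 + 1 + 1 ∧ (cs.length + 1 + 1 = 3 ∨ (3 < cs.length + 1 + 1 ∧ (cs.length + 1 + 1) % 2 = 1))) from by omega)]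
      rw [pvEmit_cons]
      rw [show cs.length + 1 - 1 = cs.length from by omega]
      rw [if_pos (show cs.length + 1 < cs.length + 1 + 1 + 1 ∧ (cs.length + 1 = 3 ∨ (3 < cs.length + 1 ∧ (cs.length + 1) % 2 = 1)) from by omega)]
      rw [pvEmit_cons]
      rw [show cs.length + 1 - 1 = cs.length from by omega]
      rw [if_neg (show ¬(cs.length + 1 < cs.length + 1 ∧ (cs.length + 1 = 3 ∨ (3 < cs.length + 1 ∧ (cs.length + 1) % 2 = 1))) from by omega)]
      rw [pv_emit_shift cs (cs.length + 1 + 1 + 1) (cs.length + 1) cs.length (by omega) (by omega)]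
      simp

-- A's right-to-left group list (from the earlier reduction of A's comprehension)
def pvBGroups (dl : List Char) : Nat → List (List Char)
  | 0 => []
  | (k+1) => ((dl.drop (k+1-2)).take ((k+1) - (k+1-2))) :: pvBGroups dl (k+1-2)

theorem pvBGroups_zero (dl : List Char) : pvBGroups dl 0 = [] := by rw [pvBGroups]

theorem pvBGroups_pos (dl : List Char) (j : Nat) (hj : 0 < j) :
    pvBGroups dl j = ((dl.drop (j-2)).take (j - (j-2))) :: pvBGroups dl (j-2) := by
  match j, hj with
  | (i+1), _ => rw [pvBGroups]

theorem pvBGroups_split (dl : List Char) : ∀ (m : Nat), 2 < m →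
    pvBGroups dl m = pvBGroups (dl.drop (if m % 2 = 1 then 1 else 2)) (m - (if m % 2 = 1 then 1 else 2))
      ++ [dl.take (if m % 2 = 1 then 1 else 2)] := by
  intro m
  induction m using Nat.strong_induction_on with
  | _ m ih =>
    intro hm
    by_cases hp : m % 2 = 1
    · rw [if_pos hp]
      rcases Nat.lt_or_ge m 5 with h5 | h5
      · have hm3 : m = 3 := by omega
        subst hm3
        rw [pvBGroups_pos dl 3 (by omega), pvBGroups_pos dl 1 (by omega),
            pvBGroups_pos (dl.drop 1) 2 (by omega)]
        norm_num [pvBGroups_zero, List.drop_drop]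
      · rw [pvBGroups_pos dl m (by omega), ih (m-2) (by omega) (by omega),
            if_pos (show (m-2) % 2 = 1 from by omega),
            pvBGroups_pos (dl.drop 1) (m-1) (by omega)]
        simp only [List.cons_append]
        rw [show m - (m - 2) = 2 from by omega, show m - 1 - (m - 1 - 2) = 2 from by omega,
            show (dl.drop 1).drop (m - 1 - 2) = dl.drop (m - 2) from by
              rw [List.drop_drop]; congr 1; omega,
            show m - 2 - 1 = m - 1 - 2 from by omega]
    · rw [if_neg hp]
      rcases Nat.lt_or_ge m 5 with h5 | h5
      · have hm4 : m = 4 := by omega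
        subst hm4
        rw [pvBGroups_pos dl 4 (by omega), pvBGroups_pos dl 2 (by omega),
            pvBGroups_pos (dl.drop 2) 2 (by omega)]
        norm_num [pvBGroups_zero, List.drop_drop]
      · rw [pvBGroups_pos dl m (by omega), ih (m-2) (by omega) (by omega),
            if_neg (show ¬ (m-2) % 2 = 1 from by omega),
            pvBGroups_pos (dl.drop 2) (m-2) (by omega)]
        simp only [List.cons_append]
        rw [show m - (m - 2) = 2 from by omega, show m - 2 - (m - 2 - 2) = 2 from by omega,
            show (dl.drop 2).drop (m - 2 - 2) = dl.drop (m - 2) from by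
              rw [List.drop_drop]; congr 1; omega,
            show m - 2 - 2 = m - 2 - 2 from rfl]

-- joined A-groups = B's forward emission
theorem pv_main (dl : List Char) (h : 3 < dl.length) :
    PySem.Chars.join [','] ((dl.drop (dl.length - 3) :: pvBGroups dl (dl.length - 3)).reverse)
      = pvEmit dl.length dl dl.length := by
  induction hlen : dl.length using Nat.strong_induction_on generalizing dl with
  | _ n ih =>
    subst hlen
    set m := dl.length - 3 with hm
    by_cases hm2 : 2 < m
    · set g : Nat := if m % 2 = 1 then 1 else 2 with hgd
      have hg12 : g = 1 ∨ g = 2 := by rw [hgd]; split_ifs <;> simp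
      have hglen : g < dl.length := by omega
      rw [pvBGroups_split dl m hm2]
      rw [← hgd]
      have hrev : (dl.drop (dl.length - 3) :: (pvBGroups (dl.drop g) (m - g) ++ [dl.take g])).reverse
          = dl.take g :: ((dl.drop g).drop ((dl.drop g).length - 3) :: pvBGroups (dl.drop g) ((dl.drop g).length - 3)).reverse := by
        have hlen' : (dl.drop g).length = dl.length - g := by simp
        have hml : (dl.drop g).length - 3 = m - g := by omega
        rw [hml, List.drop_drop]
        rw [show g + (m - g) = dl.length - 3 from by rcases hg12 with h1 | h1 <;> omega]
        simp [List.reverse_append]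
      rw [hrev]
      have hne : ((dl.drop g).drop ((dl.drop g).length - 3) :: pvBGroups (dl.drop g) ((dl.drop g).length - 3)).reverse ≠ [] := by
        simp
      obtain ⟨x, L, hxL⟩ : ∃ x L, ((dl.drop g).drop ((dl.drop g).length - 3) :: pvBGroups (dl.drop g) ((dl.drop g).length - 3)).reverse = x :: L := by
        rcases hc : ((dl.drop g).drop ((dl.drop g).length - 3) :: pvBGroups (dl.drop g) ((dl.drop g).length - 3)).reverse with _ | ⟨x, L⟩
        · exact absurd hc hne
        · exact ⟨x, L, rfl⟩
      rw [hxL, PySem.Chars.join_cons_cons, ← hxL]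
      have hlen3 : 3 < (dl.drop g).length := by simp; omega
      rw [ih (dl.drop g).length (by simp; omega) (dl.drop g) hlen3 rfl]
      rw [pv_emit_peel dl h, ← hgd]
      rw [show (dl.drop g).length = dl.length - g from by simp]
    · -- m = 1 or m = 2; the group list is [take m, drop m]
      have hm12 : m = 1 ∨ m = 2 := by omega
      have hgb : pvBGroups dl m = [dl.take m] := by
        rcases hm12 with h1 | h1
        · rw [h1, pvBGroups_pos dl 1 (by omega)]; norm_num [pvBGroups_zero]
        · rw [h1, pvBGroups_pos dl 2 (by omega)]; norm_num [pvBGroups_zero]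
      rw [hgb]
      have hgm : (if (dl.length - 3) % 2 = 1 then 1 else 2) = m := by
        rw [← hm]; rcases hm12 with h1 | h1 <;> simp [h1]
      rw [pv_emit_peel dl h, hgm]
      have h3 : dl.length - m = 3 := by omega
      rw [h3]
      have hdlen : (dl.drop m).length = 3 := by simp; omega
      rw [show pvEmit 3 (dl.drop m) 3 = dl.drop m from pv_emit_three _]
      simp [PySem.Chars.join_cons_cons, PySem.Chars.join_singleton, List.append_assoc]

-- ===== A-side reduction lemmas (comprehension → pvBGroups), as in the ports =====

theorem pv_grp (dl : List Char) (m i : Nat) (hi : i < m) (hm : m ≤ dl.length) :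
    PySem.List.slice (dl.take m) (some (-2 - (i:Int))) (some ((m:Int) - (i:Int)))
      = (dl.drop (m - i - 2)).take ((m - i) - (m - i - 2)) := by
  have hlen : (dl.take m).length = m := by rw [List.length_take]; omega
  have h1 : PySem.List.clampIdx m (-2 - (i:Int)) = m - i - 2 := by
    unfold PySem.List.clampIdx; split_ifs <;> omega
  have h2 : PySem.List.clampIdx m ((m:Int) - (i:Int)) = m - i := by
    unfold PySem.List.clampIdx; split_ifs <;> omega
  simp only [PySem.List.slice, hlen, h1, h2]
  rw [List.drop_take, List.take_take]
  congr 1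
  omega

theorem pv_nat (m : Nat) (dl : List Char) :
    (List.range ((m+1)/2)).map
        (fun j => (dl.drop (m - 2*j - 2)).take ((m - 2*j) - (m - 2*j - 2)))
      = pvBGroups dl m := by
  induction m using Nat.strong_induction_on with
  | _ m ih =>
    match m with
    | 0 => simp [pvBGroups]
    | (k+1) =>
      have hc : ((k+1)+1)/2 = ((k+1-2)+1)/2 + 1 := by omega
      rw [hc, List.range_succ_eq_map, List.map_cons, List.map_map]
      show _ :: _ = pvBGroups dl (k+1)
      rw [pvBGroups]
      congr 1
      rw [← ih (k+1-2) (by omega)]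
      apply List.map_congr_left
      intro j _
      simp only [Function.comp_apply, Nat.succ_eq_add_one]
      have e1 : k+1 - 2*(j+1) - 2 = (k+1-2) - 2*j - 2 := by omega
      rw [e1]
      congr 1
      omega

theorem pv_range (dl : List Char) (m : Nat) (hm : m ≤ dl.length) :
    (PySem.List.pyRange 0 (m:Int) 2).map
        (fun i => PySem.List.slice (dl.take m) (some (-2 - i)) (some ((m:Int) - i)))
      = (List.range ((m+1)/2)).map
        (fun j => (dl.drop (m - 2*j - 2)).take ((m - 2*j) - (m - 2*j - 2))) := by
  rw [PySem.List.pyRange_of_pos 0 (m:Int) (by norm_num), List.map_map]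
  rcases Nat.eq_zero_or_pos m with h0 | hpos
  · subst h0; simp
  · have hif : (if (0:Int) < (m:Int) then (((m:Int) - 0 + 2 - 1)/2).toNat else 0) = (m+1)/2 := by
      rw [if_pos (by exact_mod_cast hpos)]; omega
    rw [hif]
    apply List.map_congr_left
    intro j hj
    have hjm : 2*j < m := by
      have := List.mem_range.mp hj; omega
    have hgrp := pv_grp dl m (2*j) hjm hm
    simp only [Function.comp_apply]
    have hcast1 : (0:Int) + 2 * (j:Int) = ((2*j : Nat) : Int) := by push_cast; ring
    rw [hcast1, hgrp]

theorem pv_join (sep y : List Char) (xs : List (List Char)) (h : xs ≠ []) :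
    PySem.Chars.join sep (xs ++ [y]) = PySem.Chars.join sep xs ++ sep ++ y := by
  induction xs with
  | nil => exact absurd rfl h
  | cons x rest ih =>
    cases rest with
    | nil => simp [PySem.Chars.join_cons_cons, PySem.Chars.join_singleton]
    | cons x' rest' =>
      have ih' := ih (by simp)
      simp only [List.cons_append] at ih' ⊢
      rw [PySem.Chars.join_cons_cons, ih', PySem.Chars.join_cons_cons]
      simp [List.append_assoc]

theorem pv_left (dl : List Char) (h3 : 3 < dl.length) :
    PySem.List.slice dl (some 0) (some ((dl.length : Int) - 3)) = dl.take (dl.length - 3) := by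
  have h1 : PySem.List.clampIdx dl.length 0 = 0 := by
    unfold PySem.List.clampIdx; split_ifs <;> omega
  have h2 : PySem.List.clampIdx dl.length ((dl.length : Int) - 3) = dl.length - 3 := by
    unfold PySem.List.clampIdx; split_ifs <;> omega
  simp only [PySem.List.slice, h1, h2, List.drop_zero, Nat.sub_zero]

theorem pv_right (dl : List Char) (h3 : 3 < dl.length) :
    PySem.List.slice dl (some (-3)) none = dl.drop (dl.length - 3) := by
  rw [PySem.List.slice_some_none]
  congr 1
  unfold PySem.List.clampIdx; split_ifs <;> omega

theorem pv_groups_ne (dl : List Char) (m : Nat) (hm : 0 < m) : pvBGroups dl m ≠ [] := by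
  match m with
  | (k+1) => rw [pvBGroups]; simp

-- A's grouped-left-plus-right string equals B's forward emission
theorem pv_key (dl : List Char) (h3 : 3 < dl.length) :
    PySem.Chars.join [','] (((PySem.List.pyRange 0
        (((PySem.List.slice dl (some 0) (some ((dl.length:Int) - 3))).length : Int)) 2).map
        (fun i => PySem.List.slice (PySem.List.slice dl (some 0) (some ((dl.length:Int) - 3)))
          (some (-2 - i))
          (some (((PySem.List.slice dl (some 0) (some ((dl.length:Int) - 3))).length : Int) - i)))).reverse)
      ++ [','] ++ PySem.List.slice dl (some (-3)) none
    = pvEmit dl.length dl dl.length := by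
  have hL := pv_left dl h3
  have hlen : (PySem.List.slice dl (some 0) (some ((dl.length:Int) - 3))).length = dl.length - 3 := by
    rw [hL, List.length_take]; omega
  rw [hL, hlen] at *
  rw [pv_range dl (dl.length - 3) (by omega), pv_nat, pv_right dl h3]
  rw [← pv_join [','] (dl.drop (dl.length - 3)) ((pvBGroups dl (dl.length - 3)).reverse) (by
      simp only [ne_eq, List.reverse_eq_nil_iff]
      exact pv_groups_ne dl _ (by omega))]
  rw [← List.reverse_cons]
  exact pv_main dl h3

-- ===== VERDICT (by name: the statement is the Claim_ definition above) =====
theorem comma_seperated_bangla_spec : Claim_equal_comma_seperated_bangla := by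
  intro value _
  unfold Spec_comma_seperated_bangla comma_seperated_bangla comma_seperated_bangla_alt
  simp only []
  by_cases h3 : (((PySem.Chars.splitOn (if value.toList ≠ [] then value.toList else "0.00".toList) ['.']).getD 0 []).length ≤ 3)
  · simp only [if_pos h3]
  · simp only [if_neg h3]
    set dl := (PySem.Chars.splitOn (if value.toList ≠ [] then value.toList else "0.00".toList) ['.']).getD 0 [] with hdl
    have hkey := pv_key dl (by omega)
    have hfold : (dl.foldl (pvBStep dl.length) ([], dl.length)).1 = pvEmit dl.length dl dl.length := by
      rw [pv_fold_emit]; rfl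
    set dr := (if (PySem.Chars.splitOn (if value.toList ≠ [] then value.toList else "0.00".toList) ['.']).length > 1
        then (PySem.Chars.splitOn (if value.toList ≠ [] then value.toList else "0.00".toList) ['.']).getD 1 [] else []) with hdr
    by_cases hdrn : 1 ≤ dr.length
    · rw [if_pos hdrn, if_pos (by intro hc; rw [hc] at hdrn; simp at hdrn)]
      rw [hkey, hfold]
    · rw [if_neg hdrn, if_neg (show ¬ dr ≠ [] from by
        simp only [ne_eq, not_not]
        exact List.eq_nil_of_length_eq_zero (by omega))]
      rw [hkey, hfold]
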